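-- pv_equiv track=rewrite | github.com/BoweFlex/advent-of-code | 2023/python/day07/day07.py | get_hand_strength
-- ===== SOURCE A (Python) =====
-- def get_hand_strength(hand):
--     card_counts = {}
--     for card in hand:
--         if card in card_counts.keys():
--             card_counts[card] += 1
--         else:
--             card_counts.update({card: 1})
--     if 5 in card_counts.values():
--         return 7
--     elif 4 in card_counts.values():
--         return 6
--     elif 3 in card_counts.values() and 2 in card_counts.values():
--         return 5
--     elif 3 in card_counts.values():
--         return 4
--     elif sum(count for count in card_counts.values() if count == 2) == 4:
--         return 3
--     elif 2 in card_counts.values():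
--         return 2
--     else:
--         return 1
-- ===== SOURCE B (Python) =====
-- def get_hand_strength(hand):
--     # Peel off one card group at a time: take the first remaining card, count its
--     # occurrences, record the group size in running flags, delete the group, repeat.
--     has5 = has4 = has3 = False
--     pairs = 0
--     rest = hand
--     while rest:
--         card = rest[0]
--         k = rest.count(card)
--         if k == 5:
--             has5 = True
--         elif k == 4:
--             has4 = True
--         elif k == 3:
--             has3 = True
--         elif k == 2:
--             pairs += 1
--         rest = rest.replace(card, "")
--     if has5:
--         return 7
--     if has4:
--         return 6
--     if has3:
--         return 5 if pairs else 4
--     if pairs == 2: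
--         return 3
--     if pairs:
--         return 2
--     return 1
-- ===== Notes on version B (the rewrite author's own statement) =====
-- stated objective: alternative
-- what changed: B builds no dict at all: it repeatedly peels off the whole group of the first remaining card (str.count it, record the group size in running flags/pair counter, str.replace-delete all its copies) and dispatches once on the accumulated flags, instead of A's per-character count dictionary plus repeated membership scans and a filtered sum over its values.
import Mathlib
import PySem

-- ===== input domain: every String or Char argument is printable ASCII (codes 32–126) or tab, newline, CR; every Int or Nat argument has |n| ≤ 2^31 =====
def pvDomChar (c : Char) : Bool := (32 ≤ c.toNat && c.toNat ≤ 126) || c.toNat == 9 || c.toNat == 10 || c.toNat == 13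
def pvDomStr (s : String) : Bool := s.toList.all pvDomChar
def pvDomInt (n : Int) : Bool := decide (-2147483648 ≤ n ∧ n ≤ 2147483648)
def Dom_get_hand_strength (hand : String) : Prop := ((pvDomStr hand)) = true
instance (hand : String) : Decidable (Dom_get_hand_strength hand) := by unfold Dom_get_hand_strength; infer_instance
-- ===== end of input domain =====

-- B never builds a dict: it peels off one card group at a time (count the first
-- remaining card, record the group size, delete all its copies) and dispatches once
-- on the accumulated flags, instead of A's dict of counts plus repeated value scans.

-- ===== PORT A =====
def get_hand_strength (hand : String) : Int :=
  let card_counts : PySem.Dict Char Int :=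
    hand.toList.foldl
      (fun d card =>
        if d.contains card then d.insert card (d.getD card 0 + 1)
        else d.insert card 1)
      PySem.Dict.empty
  let vals := card_counts.values
  if (5 : Int) ∈ vals then 7
  else if (4 : Int) ∈ vals then 6
  else if (3 : Int) ∈ vals ∧ (2 : Int) ∈ vals then 5
  else if (3 : Int) ∈ vals then 4
  else if (vals.filter (fun count => count == 2)).sum = 4 then 3
  else if (2 : Int) ∈ vals then 2
  else 1

-- ===== PORT B =====
-- B's while-loop: on each step card = rest[0], k = rest.count(card) (single-char
-- count = List.count, exact), rest = rest.replace(card, "") (single-char deletion =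
-- filter, exact); the post-loop dispatch is the [] base case's caller below.
def scanB : List Char → Bool → Bool → Bool → Int → Bool × Bool × Bool × Int
  | [], h5, h4, h3, pairs => (h5, h4, h3, pairs)
  | card :: rest, h5, h4, h3, pairs =>
    if (card :: rest).count card = 5 then
      scanB ((card :: rest).filter (fun x => x != card)) true h4 h3 pairs
    else if (card :: rest).count card = 4 then
      scanB ((card :: rest).filter (fun x => x != card)) h5 true h3 pairs
    else if (card :: rest).count card = 3 then
      scanB ((card :: rest).filter (fun x => x != card)) h5 h4 true pairs
    else if (card :: rest).count card = 2 then
      scanB ((card :: rest).filter (fun x => x != card)) h5 h4 h3 (pairs + 1)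
    else
      scanB ((card :: rest).filter (fun x => x != card)) h5 h4 h3 pairs
termination_by l => l.length
decreasing_by
  all_goals
    simp only [List.filter_cons, bne_self_eq_false, List.length_cons]
    exact Nat.lt_succ_of_le (List.length_filter_le _ rest)

def get_hand_strength_alt (hand : String) : Int :=
  match scanB hand.toList false false false 0 with
  | (h5, h4, h3, pairs) =>
    if h5 then 7
    else if h4 then 6
    else if h3 then (if pairs ≠ 0 then 5 else 4)
    else if pairs = 2 then 3
    else if pairs ≠ 0 then 2
    else 1

-- ===== PRECONDITION & SPEC =====
def Spec_get_hand_strength (hand : String) (out : Int) : Prop := out = get_hand_strength_alt hand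
instance (hand : String) (out : Int) : Decidable (Spec_get_hand_strength hand out) := by unfold Spec_get_hand_strength; infer_instance

-- ===== CLAIM (what is proved, stated in full; the proofs are below) =====
def Claim_equal_get_hand_strength : Prop := ∀ (hand : String), Dom_get_hand_strength hand → Spec_get_hand_strength hand (get_hand_strength hand)

-- ===== LEMMAS AND PROOFS =====

-- number of distinct cards occurring exactly twice in l
def pairsOf (l : List Char) : Nat :=
  (PySem.Set.ofList l).countP (fun k => l.count k == 2)

theorem countsA_eq_counter (l : List Char) :
    l.foldl
      (fun d card =>
        if d.contains card then d.insert card (d.getD card 0 + 1)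
        else d.insert card 1)
      PySem.Dict.empty = PySem.Dict.counter l := by
  rw [← PySem.Dict.foldl_insert_getD_add_one_eq_counter]
  apply PySem.List.foldl_congr_mem
  intro d card _
  by_cases h : d.contains card = true
  · simp [h]
  · simp only [Bool.not_eq_true] at h
    simp [h, PySem.Dict.getD_of_not_contains d 0 h]

theorem vals_counter (l : List Char) :
    (PySem.Dict.counter l).values = (PySem.Set.ofList l).map (fun k => (l.count k : Int)) := by
  simp [PySem.Dict.values, PySem.Dict.items_counter, List.map_map]

theorem mem_vals (l : List Char) (v : Nat) :
    ((v : Int) ∈ (PySem.Dict.counter l).values) ↔ ∃ c ∈ l, l.count c = v := by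
  rw [vals_counter]
  simp only [List.mem_map, PySem.Set.mem_ofList]
  constructor
  · rintro ⟨c, hc, h⟩; exact ⟨c, hc, by exact_mod_cast h⟩
  · rintro ⟨c, hc, h⟩; exact ⟨c, hc, by exact_mod_cast h⟩

theorem sum_vals_two (l : List Char) :
    (((PySem.Dict.counter l).values.filter (fun count => count == 2)).sum) = 2 * (pairsOf l : Int) := by
  rw [vals_counter, List.filter_beq, List.sum_replicate, List.count_eq_countP, List.countP_map,
    pairsOf]
  have : ((fun (count : Int) => count == 2) ∘ (fun k => (l.count k : Int)))
      = (fun k => l.count k == 2) := by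
    funext k; simp [Function.comp]; omega
  rw [this]; simp [mul_comm]

-- counts of survivors of the group deletion are unchanged
theorem count_filter_ne (l : List Char) (c x : Char) (hx : x ≠ c) :
    (l.filter (fun y => y != c)).count x = l.count x := by
  rw [List.count_filter]; simp [hx]

theorem pairsOf_cons (card : Char) (rest : List Char) :
    pairsOf (card :: rest)
      = (if (card :: rest).count card = 2 then 1 else 0)
        + pairsOf ((card :: rest).filter (fun x => x != card)) := by
  have hfil : (card :: rest).filter (fun x => x != card) = rest.filter (fun x => x != card) := by
    simp
  rw [hfil, pairsOf, PySem.Set.ofList_cons, List.countP_cons]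
  have h1 : (PySem.Set.discard (PySem.Set.ofList rest) card).countP
      (fun k => (card :: rest).count k == 2)
      = pairsOf (rest.filter (fun x => x != card)) := by
    rw [List.countP_congr (q := fun k => (rest.filter (fun x => x != card)).count k == 2)]
    · apply List.Perm.countP_eq
      apply (List.perm_ext_iff_of_nodup
        (PySem.Set.nodup_discard _ _ (PySem.Set.nodup_ofList rest))
        (PySem.Set.nodup_ofList _)).mpr
      intro a
      simp [PySem.Set.mem_discard, PySem.Set.mem_ofList, List.mem_filter]
    · intro a ha
      have hne : a ≠ card := ((PySem.Set.mem_discard _ _ _).mp ha).2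
      rw [count_filter_ne rest card a hne]
      simp [Ne.symm hne]
  rw [h1]
  simp [Nat.add_comm]

theorem exists_count_cons (card : Char) (rest : List Char) (v : Nat) :
    (∃ c ∈ card :: rest, (card :: rest).count c = v)
      ↔ ((card :: rest).count card = v
         ∨ ∃ c ∈ (card :: rest).filter (fun x => x != card),
             ((card :: rest).filter (fun x => x != card)).count c = v) := by
  constructor
  · rintro ⟨c, hc, hv⟩
    by_cases h : c = card
    · subst h; exact Or.inl hv
    · right
      refine ⟨c, ?_, ?_⟩
      · simp only [List.mem_filter]
        rcases List.mem_cons.mp hc with h' | h'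
        · exact absurd h' h
        · simp [List.mem_cons, h', h]
      · rw [count_filter_ne _ card c h, hv]
  · rintro (h | ⟨c, hc, hv⟩)
    · exact ⟨card, List.mem_cons_self, h⟩
    · have hne : c ≠ card := by
        have := (List.mem_filter.mp hc).2; simpa using this
      exact ⟨c, (List.mem_filter.mp hc).1,
        by rw [← count_filter_ne (card :: rest) card c hne, hv]⟩

theorem scanB_inv (l : List Char) (h5 h4 h3 : Bool) (p : Int) :
    scanB l h5 h4 h3 p
      = (h5 || decide (∃ c ∈ l, l.count c = 5),
         h4 || decide (∃ c ∈ l, l.count c = 4),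
         h3 || decide (∃ c ∈ l, l.count c = 3),
         p + (pairsOf l : Int)) := by
  fun_induction scanB l h5 h4 h3 p with
  | case1 h5 h4 h3 p => simp [pairsOf, PySem.Set.ofList]
  | case2 card rest h5 h4 h3 p hk ih =>
    rw [ih]
    simp only [exists_count_cons card rest 5, exists_count_cons card rest 4,
      exists_count_cons card rest 3, pairsOf_cons card rest, hk]
    simp
  | case3 card rest h5 h4 h3 p hk5 hk ih =>
    rw [ih]
    simp only [exists_count_cons card rest 5, exists_count_cons card rest 4,
      exists_count_cons card rest 3, pairsOf_cons card rest, hk]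
    simp
  | case4 card rest h5 h4 h3 p hk5 hk4 hk ih =>
    rw [ih]
    simp only [exists_count_cons card rest 5, exists_count_cons card rest 4,
      exists_count_cons card rest 3, pairsOf_cons card rest, hk]
    simp
  | case5 card rest h5 h4 h3 p hk5 hk4 hk3 hk ih =>
    rw [ih]
    simp only [exists_count_cons card rest 5, exists_count_cons card rest 4,
      exists_count_cons card rest 3, pairsOf_cons card rest, hk]
    simp
    ring
  | case6 card rest h5 h4 h3 p hk5 hk4 hk3 hk2 ih =>
    rw [ih]
    simp only [exists_count_cons card rest 5, exists_count_cons card rest 4,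
      exists_count_cons card rest 3, pairsOf_cons card rest]
    simp only [List.count_cons_self] at hk5 hk4 hk3 hk2
    have c4 : ¬ List.count card rest = 4 := by omega
    have c3 : ¬ List.count card rest = 3 := by omega
    have c2 : ¬ List.count card rest = 2 := by omega
    have c1 : ¬ List.count card rest = 1 := by omega
    simp [c4, c3, c2, c1]

theorem pairsOf_pos (l : List Char) :
    (∃ c ∈ l, l.count c = 2) ↔ pairsOf l ≠ 0 := by
  rw [pairsOf, ← Nat.pos_iff_ne_zero, List.countP_pos_iff]
  simp [PySem.Set.mem_ofList]

-- ===== VERDICT (by name: the statement is the Claim_ definition above) =====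
theorem get_hand_strength_spec : Claim_equal_get_hand_strength := by
  intro hand _
  show get_hand_strength hand = get_hand_strength_alt hand
  unfold get_hand_strength get_hand_strength_alt
  rw [countsA_eq_counter, scanB_inv]
  have m5 := mem_vals hand.toList 5
  have m4 := mem_vals hand.toList 4
  have m3 := mem_vals hand.toList 3
  have m2 := mem_vals hand.toList 2
  have p2 := pairsOf_pos hand.toList
  push_cast at m5 m4 m3 m2
  simp only [Bool.false_or, zero_add, decide_eq_true_eq]
  rw [sum_vals_two hand.toList]
  simp only [m5, m4, m3, m2]
  by_cases e5 : ∃ c ∈ hand.toList, List.count c hand.toList = 5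
  · simp [e5]
  by_cases e4 : ∃ c ∈ hand.toList, List.count c hand.toList = 4
  · simp [e5, e4]
  by_cases e3 : ∃ c ∈ hand.toList, List.count c hand.toList = 3
  · by_cases e2 : ∃ c ∈ hand.toList, List.count c hand.toList = 2
    · have : pairsOf hand.toList ≠ 0 := p2.mp e2
      simp [e5, e4, e3, e2, this]
    · have : pairsOf hand.toList = 0 := by
        by_contra h; exact e2 (p2.mpr h)
      simp [e5, e4, e3, e2, this]
  by_cases e2 : ∃ c ∈ hand.toList, List.count c hand.toList = 2
  · have hp : pairsOf hand.toList ≠ 0 := p2.mp e2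
    by_cases hp2 : pairsOf hand.toList = 2
    · simp [e5, e4, e3, e2, hp2]
    · have h4 : ¬ (2 * (pairsOf hand.toList : Int) = 4) := by omega
      have h2' : ¬ ((pairsOf hand.toList : Int) = 2) := by omega
      simp [e5, e4, e3, e2, h4, h2', hp]
  · have : pairsOf hand.toList = 0 := by
      by_contra h; exact e2 (p2.mpr h)
    simp [e5, e4, e3, e2, this]
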